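-- pv_equiv track=rewrite | github.com/dpchitester/android_dev | pybackup/tool/pytogo.py | flipsingle
-- ===== SOURCE A (Python) =====
-- def flipsingle(s):
--     "Map multicharacter single-quote literals to double-quote literals."
--     indouble = False
--     insingle = None
--     escaped = False
--     e = list(s)
--     # pylint: disable=consider-using-enumerate
--     for i in range(len(e)):
--         # Prevent special handling of quotes with backslash
--         if escaped:
--             escaped = False
--             continue
--         elif e[i] == '\\':
--             escaped = True
--             continue
--         # Possible comment
--         if e[i] == '#' and not insingle and not indouble:
--             return "".join(e[:i]), s[i:]
--         # Starting a doublequoted string span outside a single-quote span?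
--         if s[i] == '"' and insingle is None:
--             indouble = not indouble
--             continue
--         if indouble:
--             continue
--         # If we get here, we're outside any double quotes.
--         # Pass through anything not a single quote.
--         if e[i] != "'":
--             continue
--         # We're at a single quote.
--         if not indouble and insingle is None: # Opener
--             insingle = i
--             continue
--         if insingle is not None and s[insingle:i].count('"') == 0:
--             e[insingle] = e[i] = '"'
--             insingle = None
--     return "".join(e), None
-- ===== SOURCE B (Python) =====
-- def flipsingle(s):
--     "Map multicharacter single-quote literals to double-quote literals."
--     n = len(s)
--     out = []
--     i = 0
--     while i < n:
--         c = s[i]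
--         if c == '\\':
--             out.append(s[i:i + 2])
--             i += 2
--         elif c == '#':
--             return ''.join(out), s[i:]
--         elif c == '"':
--             # consume a double-quoted span verbatim up to its unescaped closer
--             j = i + 1
--             esc = False
--             while j < n:
--                 if esc:
--                     esc = False
--                 elif s[j] == '\\':
--                     esc = True
--                 elif s[j] == '"':
--                     break
--                 j += 1
--             out.append(s[i:j + 1])
--             i = j + 1
--         elif c == "'":
--             # look ahead for the closing quote: the first unescaped "'" with no
--             # double quote (escaped or not) in between; a double quote blocks
--             # closing for good, so the span (and the rest) is copied verbatim
--             j = i + 1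
--             esc = False
--             close = None
--             while j < n and s[j] != '"':
--                 if esc:
--                     esc = False
--                 elif s[j] == '\\':
--                     esc = True
--                 elif s[j] == "'":
--                     close = j
--                     break
--                 j += 1
--             if close is None:
--                 out.append(s[i:])
--                 return ''.join(out), None
--             out.append('"' + s[i + 1:close] + '"')
--             i = close + 1
--         else:
--             out.append(c)
--             i += 1
--     return ''.join(out), None
-- ===== Notes on version B (the rewrite author's own statement) =====
-- stated objective: alternative
-- what changed: B is a span-consuming tokenizer: instead of A's flat per-character state machine (indouble/insingle/escaped flags plus a substring re-count at every candidate closer), B's outer loop only sees span starters and uses dedicated inner lookahead scanners to consume a whole double-quoted span verbatim, or to find a single-quote span's closer (first unescaped ' with no " in between) and emit the rewritten span in one step.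
-- intended difference: On strings that open a single-quote span at index 0 and contain an unescaped hash character inside it before the span closes, A splits there as a comment because its comment check treats an opener index of 0 as falsy, unlike the None comparisons it uses everywhere else: A("'a#") = ("'a", "#"), while B keeps the hash inside the span and returns ("'a#", None), the intended behaviour for a comment character inside a string literal. — e.g. on flipsingle("'a#"): A returns ("'a", some "#"), B returns ("'a#", none)
import Mathlib
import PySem

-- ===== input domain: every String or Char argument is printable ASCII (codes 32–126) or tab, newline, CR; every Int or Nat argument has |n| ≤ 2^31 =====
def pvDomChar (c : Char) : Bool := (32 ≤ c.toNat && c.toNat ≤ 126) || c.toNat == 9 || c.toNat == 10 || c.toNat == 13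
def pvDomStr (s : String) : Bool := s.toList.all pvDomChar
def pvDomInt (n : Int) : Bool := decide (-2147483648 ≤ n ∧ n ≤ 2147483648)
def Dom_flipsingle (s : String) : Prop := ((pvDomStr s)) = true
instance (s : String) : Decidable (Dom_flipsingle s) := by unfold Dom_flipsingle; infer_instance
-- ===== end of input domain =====

-- B replaces A's flat per-character state machine (with a substring re-count at every candidate
-- closer) by a span-consuming tokenizer: the outer loop sees only span starters and inner lookahead
-- scanners consume a whole double-quoted span, or locate a single-quote span's closer and emit the
-- rewritten span in one step (alternative algorithm); on strings whose single-quote span opens at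
-- index 0 and contains an unescaped '#' inside it, A's falsy-0 'not insingle' check wrongly splits
-- there and B intentionally does not (see D_flipsingle).


-- ===== PORT A =====
-- literal port of A: e = list(s) mutated in place, index loop, substring re-count at each closer;
-- Python's 'not insingle' is falsy for None AND for index 0, ported as (insingle = none ∨ insingle = some 0)
def flipsingleGo (s : List Char) (e : List Char) (indouble : Bool)
    (insingle : Option Nat) (escaped : Bool) (i : Nat) : (fuel : Nat) →
    List Char × Option (List Char)
  | 0 => (e, none)
  | fuel + 1 =>
    if escaped then
      flipsingleGo s e indouble insingle false (i + 1) fuel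
    else if e.getD i ' ' = '\\' then
      flipsingleGo s e indouble insingle true (i + 1) fuel
    else if e.getD i ' ' = '#' ∧ (insingle = none ∨ insingle = some 0) ∧ indouble = false then
      (e.take i, some (s.drop i))
    else if s.getD i ' ' = '"' ∧ insingle = none then
      flipsingleGo s e (!indouble) insingle escaped (i + 1) fuel
    else if indouble then
      flipsingleGo s e indouble insingle escaped (i + 1) fuel
    else if ¬ (e.getD i ' ' = '\'') then
      flipsingleGo s e indouble insingle escaped (i + 1) fuel
    else if indouble = false ∧ insingle = none then
      flipsingleGo s e indouble (some i) escaped (i + 1) fuel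
    else
      match insingle with
      | some j =>
        if (PySem.List.slice s (some (j : Int)) (some (i : Int))).count '"' = 0 then
          flipsingleGo s ((e.set j '"').set i '"') indouble none escaped (i + 1) fuel
        else
          flipsingleGo s e indouble insingle escaped (i + 1) fuel
      | none => flipsingleGo s e indouble insingle escaped (i + 1) fuel

def flipsingle (s : String) : String × Option String :=
  let r := flipsingleGo s.toList s.toList false none false 0 s.toList.length
  (String.ofList r.1, r.2.map String.ofList)

-- ===== PORT B =====
-- literal port of B's inner double-quote scanner: index (within the suffix after the opener) of the
-- unescaped closing '"', or the suffix's length if the span is unterminated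
def dqScan : List Char → Bool → Nat
  | [], _ => 0
  | c :: r, esc =>
    if esc then dqScan r false + 1
    else if c = '\\' then dqScan r true + 1
    else if c = '"' then 0
    else dqScan r false + 1

-- literal port of B's single-quote lookahead: index of the first unescaped '\'' in the suffix after
-- the opener, none if a '"' (escaped or not) comes first or the suffix runs out
def sqScan : List Char → Bool → Option Nat
  | [], _ => none
  | c :: r, esc =>
    if c = '"' then none
    else if esc then (sqScan r false).map (· + 1)
    else if c = '\\' then (sqScan r true).map (· + 1)
    else if c = '\'' then some 0
    else (sqScan r false).map (· + 1)

-- literal port of B's outer loop (the index loop over s ported as fuelled recursion on the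
-- remaining suffix; every step consumes at least one character, so fuel = length of s suffices)
def altGo : Nat → List Char → List Char × Option (List Char)
  | _, [] => ([], none)
  | 0, l => (l, none)
  | fuel + 1, c :: r =>
    if c = '\\' then
      let p := altGo fuel (r.drop 1)
      (c :: r.take 1 ++ p.1, p.2)
    else if c = '#' then ([], some (c :: r))
    else if c = '"' then
      let j := dqScan r false
      let p := altGo fuel (r.drop (j + 1))
      (c :: r.take (j + 1) ++ p.1, p.2)
    else if c = '\'' then
      match sqScan r false with
      | none => (c :: r, none)
      | some j =>
        let p := altGo fuel (r.drop (j + 1))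
        ('"' :: r.take j ++ '"' :: p.1, p.2)
    else
      let p := altGo fuel r
      (c :: p.1, p.2)

def flipsingle_alt (s : String) : String × Option String :=
  let r := altGo s.toList.length s.toList
  (String.ofList r.1, r.2.map String.ofList)

-- ===== PRECONDITION & SPEC =====
-- helper for D_: after a single-quote span opens at index 0, does the scan reach an unescaped '#'
-- before the span closes (it closes at an unescaped '\'' with no '"' seen in between)?
def dscanD : List Char → Bool → Bool → Bool
  | [], _, _ => false
  | c :: r, esc, sawDq =>
    let sawDq' := sawDq || (c == '"')
    if esc then dscanD r false sawDq'
    else if c = '\\' then dscanD r true sawDq'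
    else if c = '#' then true
    else if c = '\'' ∧ sawDq = false then false
    else dscanD r false sawDq'

-- On strings that open a single-quote span at index 0 and contain an unescaped hash character inside
-- it before the span closes, A splits there as a comment (its comment check treats an opener index of
-- 0 as falsy, unlike the None comparisons it uses elsewhere); B keeps the hash inside the span,
-- the intended behaviour for a comment character inside a string literal.
def D_flipsingle (s : String) : Prop :=
  s.toList.head? = some '\'' ∧ dscanD s.toList.tail false false = true
instance (s : String) : Decidable (D_flipsingle s) := by unfold D_flipsingle; infer_instance

def Spec_flipsingle (s : String) (out : String × Option String) : Prop :=
  ¬ D_flipsingle s → out = flipsingle_alt s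
instance (s : String) (out : String × Option String) : Decidable (Spec_flipsingle s out) := by
  unfold Spec_flipsingle; infer_instance

def pvDiffWitness_flipsingle : String := "'a#"
def pvDiffWitnessOut_flipsingle : (String × Option String) × (String × Option String) :=
  (("'a", some "#"), ("'a#", none))

-- ===== CLAIM (what is proved, stated in full; the proofs are below) =====
def Claim_unchanged_flipsingle : Prop := ∀ (s : String), Dom_flipsingle s → Spec_flipsingle s (flipsingle s)
def Claim_changed_flipsingle : Prop :=
  Dom_flipsingle (pvDiffWitness_flipsingle) ∧ D_flipsingle (pvDiffWitness_flipsingle) ∧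
  flipsingle (pvDiffWitness_flipsingle) = pvDiffWitnessOut_flipsingle.1 ∧
  flipsingle_alt (pvDiffWitness_flipsingle) = pvDiffWitnessOut_flipsingle.2 ∧
  pvDiffWitnessOut_flipsingle.1 ≠ pvDiffWitnessOut_flipsingle.2
def Claim_exact_flipsingle : Prop := ∀ (s : String), Dom_flipsingle s → D_flipsingle s →
  flipsingle s ≠ flipsingle_alt s

-- ===== LEMMAS AND PROOFS =====

-- proof-only intermediate machine: A's flat scan with the substring re-count replaced by a running
-- double-quote counter compared with a snapshot taken at the opener; the proof goes
-- flipsingle = flipM (flip_go_eq, outside D_) and flipM = altGo (flipM_alt, unconditionally)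
def flipM (rest : List Char) (out : List Char) (indouble : Bool)
    (opener : Option (Nat × Nat)) (escaped : Bool) (dq : Nat) :
    List Char × Option (List Char) :=
  match rest with
  | [] => (out, none)
  | c :: rest' =>
    let dq' := if c = '"' then dq + 1 else dq
    if escaped then
      flipM rest' (out ++ [c]) indouble opener false dq'
    else if c = '\\' then
      flipM rest' (out ++ [c]) indouble opener true dq'
    else if c = '#' ∧ opener = none ∧ indouble = false then
      (out, some (c :: rest'))
    else if c = '"' ∧ opener = none then
      flipM rest' (out ++ [c]) (!indouble) opener escaped dq'
    else if indouble = false ∧ c = '\'' then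
      match opener with
      | none => flipM rest' (out ++ [c]) indouble (some (out.length, dq)) escaped dq'
      | some (j, snap) =>
        if dq = snap then
          flipM rest' (out.set j '"' ++ ['"']) indouble none escaped dq'
        else
          flipM rest' (out ++ [c]) indouble opener escaped dq'
    else
      flipM rest' (out ++ [c]) indouble opener escaped dq'

-- number of characters dscanD consumes before the in-span '#' it finds (proof-only helper)
def dposD : List Char → Bool → Bool → Nat
  | [], _, _ => 0
  | c :: r, esc, sawDq =>
    let sawDq' := sawDq || (c == '"')
    if esc then dposD r false sawDq' + 1
    else if c = '\\' then dposD r true sawDq' + 1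
    else if c = '#' then 0
    else if c = '\'' ∧ sawDq = false then 0
    else dposD r false sawDq' + 1

lemma flip_close_iff (s : List Char) (j i : Nat) (hj : j ≤ i) :
    (PySem.List.slice s (some (j : Int)) (some (i : Int))).count '"' = 0 ↔
      (s.take i).count '"' = (s.take j).count '"' := by
  rw [PySem.List.slice_natCast]
  have h : s.take i = s.take j ++ (s.drop j).take (i - j) := by
    rw [← List.take_add, Nat.add_sub_cancel' hj]
  rw [h, List.count_append]
  omega

lemma flip_go_eq (s : List Char) (rest : List Char) :
    ∀ (i : Nat) (out : List Char) (indouble : Bool) (insingle : Option Nat) (escaped : Bool),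
    s.drop i = rest →
    out.length = i →
    (∀ j, insingle = some j → j < i) →
    (∀ j, insingle = some j → indouble = false) →
    (insingle = some 0 → dscanD rest escaped (!((s.take i).count '"' == 0)) = false) →
    (i = 0 → ∀ r, s = '\'' :: r → dscanD r false false = false) →
    flipsingleGo s (out ++ rest) indouble insingle escaped i rest.length
      = flipM rest out indouble
          (insingle.map (fun j => (j, (s.take j).count '"'))) escaped ((s.take i).count '"') := by
  induction rest with
  | nil =>
    intro i out indouble insingle escaped h1 h2 h3 h4 h5 h6
    simp [flipsingleGo, flipM]
  | cons c rest' ih =>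
    intro i out indouble insingle escaped h1 h2 h3 h4 h5 h6
    have hlen : i < s.length := by
      have := congrArg List.length h1
      simp at this; omega
    have hgm : s[i]? = some c := by
      have h0 : (s.drop i)[0]? = some c := by rw [h1]; rfl
      simpa using h0
    have htake : s.take (i + 1) = s.take i ++ [c] := by
      rw [List.take_add_one, hgm]; rfl
    have hcnt : (s.take (i + 1)).count '"'
        = (if c = '"' then (s.take i).count '"' + 1 else (s.take i).count '"') := by
      rw [htake, List.count_append]
      by_cases hc : c = '"' <;> simp [hc]
    have hsaw : ((!((s.take i).count '"' == 0)) || (c == '"'))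
        = !((s.take (i + 1)).count '"' == 0) := by
      rw [hcnt]; by_cases hc : c = '"' <;> simp [hc]
    have hdropS : s.drop (i + 1) = rest' := by
      have := congrArg List.tail h1
      simpa [List.tail_drop] using this
    have heD : (out ++ c :: rest').getD i ' ' = c := by
      rw [← h2, List.getD_eq_getElem?_getD, List.getElem?_append_right (le_refl _)]; simp
    have hsD : s.getD i ' ' = c := by
      rw [List.getD_eq_getElem?_getD, hgm]; rfl
    have hsplit : out ++ c :: rest' = (out ++ [c]) ++ rest' := by simp
    have h6' : i + 1 = 0 → ∀ r, s = '\'' :: r → dscanD r false false = false := by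
      intro h; omega
    have h2' : (out ++ [c]).length = i + 1 := by simp [h2]
    have h3n : ∀ (j : Nat), (none : Option Nat) = some j → j < i + 1 := by intro j hj; cases hj
    have h4n : ∀ (j : Nat) (b : Bool), (none : Option Nat) = some j → b = false := by
      intro j b hj; cases hj
    have h5n : ∀ (esc : Bool), (none : Option Nat) = some 0 →
        dscanD rest' esc (!((s.take (i + 1)).count '"' == 0)) = false := by
      intro esc hj; cases hj
    have htl : (out ++ c :: rest').take i = out := by
      rw [← h2]; exact List.take_left ..
    simp only [flipsingleGo, flipM, List.length_cons, heD, hsD]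
    cases escaped with
    | true =>
      have h5' : insingle = some 0 →
          dscanD rest' false (!((s.take (i + 1)).count '"' == 0)) = false := by
        intro h0
        have hx := h5 h0
        rw [dscanD] at hx
        rw [if_pos rfl] at hx
        rwa [hsaw] at hx
      have := ih (i + 1) (out ++ [c]) indouble insingle false hdropS h2'
        (fun j hj => Nat.lt_succ_of_lt (h3 j hj)) h4 h5' h6'
      rw [hcnt] at this
      simpa using this
    | false =>
      by_cases hbs : c = '\\'
      · have h5' : insingle = some 0 →
            dscanD rest' true (!((s.take (i + 1)).count '"' == 0)) = false := by
          intro h0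
          have hx := h5 h0
          rw [dscanD] at hx
          rw [if_neg (by simp), if_pos hbs] at hx
          rwa [hsaw] at hx
        have := ih (i + 1) (out ++ [c]) indouble insingle true hdropS h2'
          (fun j hj => Nat.lt_succ_of_lt (h3 j hj)) (fun j hj => h4 j hj) h5' h6'
        rw [hcnt] at this
        simpa [hbs] using this
      · cases insingle with
        | none =>
          by_cases hh : c = '#' ∧ indouble = false
          · simp [hh.1, hh.2, h1]
            rw [← hh.1]
            exact htl
          · by_cases hq : c = '"'
            · have hnh : ¬ c = '#' := by intro h; rw [h] at hq; cases hq
              have := ih (i + 1) (out ++ [c]) (!indouble) none false hdropS h2'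
                h3n (fun j hj => h4n j _ hj) (h5n false) h6'
              rw [hcnt] at this
              simpa [hbs, hnh, hq] using this
            · cases indouble with
              | true =>
                have := ih (i + 1) (out ++ [c]) true none false hdropS h2'
                  h3n (fun j hj => h4n j _ hj) (h5n false) h6'
                rw [hcnt] at this
                simpa [hbs, hq] using this
              | false =>
                have hnh : ¬ c = '#' := fun h => hh ⟨h, rfl⟩
                by_cases hsq : c = '\''
                · have h5' : some i = some 0 →
                      dscanD rest' false (!((s.take (i + 1)).count '"' == 0)) = false := by
                    intro h0
                    have hi0 : i = 0 := by cases h0; rfl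
                    subst hi0
                    have hs : s = '\'' :: rest' := by
                      have hx := h1; simp at hx; rw [hx, hsq]
                    have hx := h6 rfl rest' hs
                    have hc1 : (s.take (0 + 1)).count '"' = 0 := by
                      rw [hs]; simp
                    rw [hc1]
                    simpa using hx
                  have := ih (i + 1) (out ++ [c]) false (some i) false hdropS h2'
                    (fun j hj => by cases hj; omega) (fun j hj => rfl) h5' h6'
                  rw [hcnt] at this
                  simpa [hbs, hnh, hsq, h2] using this
                · have := ih (i + 1) (out ++ [c]) false none false hdropS h2'
                    h3n (fun j hj => h4n j _ hj) (h5n false) h6'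
                  rw [hcnt] at this
                  simpa [hbs, hnh, hq, hsq] using this
        | some j =>
          have hjlt : j < i := h3 j rfl
          have hind : indouble = false := h4 j rfl
          subst hind
          by_cases hj0 : c = '#' ∧ j = 0
          · exfalso
            have hx := h5 (by rw [hj0.2])
            rw [dscanD] at hx
            rw [if_neg (by simp), if_neg hbs, if_pos hj0.1] at hx
            cases hx
          · by_cases hsq : c = '\''
            · have hnh : ¬ c = '#' := by intro h; rw [h] at hsq; cases hsq
              have hnq : ¬ c = '"' := by intro h; rw [h] at hsq; cases hsq
              have hiff := flip_close_iff s j i (Nat.le_of_lt hjlt)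
              by_cases hcl : (PySem.List.slice s (some (j : Int)) (some (i : Int))).count '"' = 0
              · have heq : (s.take i).count '"' = (s.take j).count '"' := hiff.mp hcl
                have hjo : j < out.length := by omega
                have hset : ((out ++ c :: rest').set j '"').set i '"'
                    = (out.set j '"' ++ ['"']) ++ rest' := by
                  rw [List.set_append, if_pos hjo, List.set_append]
                  rw [if_neg (by simp; omega)]
                  have hz : i - (out.set j '"').length = 0 := by simp; omega
                  rw [hz]
                  simp
                have h2s : (out.set j '"' ++ ['"']).length = i + 1 := by simp [h2]
                have := ih (i + 1) (out.set j '"' ++ ['"']) false none false hdropS h2s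
                  h3n (fun j hj => h4n j _ hj) (h5n false) h6'
                rw [hcnt] at this
                rw [← hset] at this
                simpa [hbs, hnh, hnq, hsq, hcl, heq] using this
              · have hne : ¬ (s.take i).count '"' = (s.take j).count '"' :=
                  fun h => hcl (hiff.mpr h)
                have h5' : some j = some 0 →
                    dscanD rest' false (!((s.take (i + 1)).count '"' == 0)) = false := by
                  intro h0
                  have hj00 : j = 0 := by cases h0; rfl
                  subst hj00
                  have hx := h5 rfl
                  have hct : (s.take i).count '"' ≠ 0 := by
                    intro h
                    exact hne (by simpa using h)
                  rw [dscanD] at hx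
                  rw [if_neg (by simp), if_neg hbs,
                    if_neg (show ¬(c = '#') from fun h => hj0 ⟨h, rfl⟩), if_neg] at hx
                  · rwa [hsaw] at hx
                  · rintro ⟨-, hw⟩
                    simp at hw
                    exact hct hw
                have := ih (i + 1) (out ++ [c]) false (some j) false hdropS h2'
                  (fun j' hj' => by cases hj'; omega) (fun j hj => rfl) h5' h6'
                rw [hcnt] at this
                simpa [hbs, hnh, hnq, hsq, hcl, hne] using this
            · have hnh : ¬(c = '#' ∧ ((some j : Option Nat) = none ∨ (some j : Option Nat) = some 0) ∧ True) := by
                rintro ⟨hc, h | h, -⟩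
                · cases h
                · exact hj0 ⟨hc, by cases h; rfl⟩
              have h5' : some j = some 0 →
                  dscanD rest' false (!((s.take (i + 1)).count '"' == 0)) = false := by
                intro h0
                have hj00 : j = 0 := by cases h0; rfl
                subst hj00
                have hx := h5 rfl
                rw [dscanD] at hx
                rw [if_neg (by simp), if_neg hbs,
                  if_neg (show ¬(c = '#') from fun h => hj0 ⟨h, rfl⟩),
                  if_neg (fun h => hsq h.1)] at hx
                rwa [hsaw] at hx
              have := ih (i + 1) (out ++ [c]) false (some j) false hdropS h2'
                (fun j' hj' => by cases hj'; omega) (fun j hj => rfl) h5' h6'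
              rw [hcnt] at this
              simpa [hbs, hsq, hj0] using this

-- flipM consumes a double-quoted span exactly as B's dqScan delimits it
lemma flipM_double (r : List Char) :
    ∀ (esc : Bool) (out : List Char) (dq : Nat),
    flipM r out true none esc dq
      = flipM (r.drop (dqScan r esc + 1)) (out ++ r.take (dqScan r esc + 1)) false none false
          (dq + ((r.take (dqScan r esc + 1)).count '"')) := by
  induction r with
  | nil => intro esc out dq; simp [flipM, dqScan]
  | cons c r ih =>
    intro esc out dq
    cases esc with
    | true =>
      have hsel : flipM (c :: r) out true none true dq
          = flipM r (out ++ [c]) true none false (if c = '"' then dq + 1 else dq) := by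
        rw [flipM]; rw [if_pos rfl]
      have hd : dqScan (c :: r) true = dqScan r false + 1 := by rw [dqScan]; rw [if_pos rfl]
      rw [hsel, ih false (out ++ [c]) _, hd]
      have hcnt : (if c = '"' then dq + 1 else dq) + ((r.take (dqScan r false + 1)).count '"')
          = dq + (((c :: r).take (dqScan r false + 1 + 1)).count '"') := by
        simp [List.count_cons]
        by_cases hc : c = '"' <;> simp [hc] <;> omega
      rw [hcnt]
      simp
    | false =>
      by_cases hbs : c = '\\'
      · have hsel : flipM (c :: r) out true none false dq
            = flipM r (out ++ [c]) true none true (if c = '"' then dq + 1 else dq) := by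
          rw [flipM]; rw [if_neg (by simp), if_pos hbs]
        have hd : dqScan (c :: r) false = dqScan r true + 1 := by
          rw [dqScan]; rw [if_neg (by simp), if_pos hbs]
        rw [hsel, ih true (out ++ [c]) _, hd]
        have hcnt : (if c = '"' then dq + 1 else dq) + ((r.take (dqScan r true + 1)).count '"')
            = dq + (((c :: r).take (dqScan r true + 1 + 1)).count '"') := by
          simp [List.count_cons]
          by_cases hc : c = '"' <;> simp [hc] <;> omega
        rw [hcnt]
        simp
      · by_cases hq : c = '"'
        · have hsel : flipM (c :: r) out true none false dq
              = flipM r (out ++ [c]) false none false (if c = '"' then dq + 1 else dq) := by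
            rw [flipM]; rw [if_neg (by simp), if_neg hbs,
              if_neg (by rintro ⟨hc, -, h⟩; cases h), if_pos ⟨hq, rfl⟩]
            simp
          have hd : dqScan (c :: r) false = 0 := by
            rw [dqScan]; rw [if_neg (by simp), if_neg hbs, if_pos hq]
          rw [hsel, hd]
          simp [hq]
        · have hsel : flipM (c :: r) out true none false dq
              = flipM r (out ++ [c]) true none false (if c = '"' then dq + 1 else dq) := by
            rw [flipM]; rw [if_neg (by simp), if_neg hbs,
              if_neg (by rintro ⟨-, -, h⟩; cases h), if_neg (fun h => hq h.1),
              if_neg (by rintro ⟨h, -⟩; cases h)]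
          have hd : dqScan (c :: r) false = dqScan r false + 1 := by
            rw [dqScan]; rw [if_neg (by simp), if_neg hbs, if_neg hq]
          rw [hsel, ih false (out ++ [c]) _, hd]
          have hcnt : (if c = '"' then dq + 1 else dq) + ((r.take (dqScan r false + 1)).count '"')
              = dq + (((c :: r).take (dqScan r false + 1 + 1)).count '"') := by
            simp [List.count_cons]
            by_cases hc : c = '"' <;> simp [hc] <;> omega
          rw [hcnt]
          simp

-- flipM is stuck once the running count exceeds the opener snapshot: the rest is copied verbatim
lemma flipM_stuck (r : List Char) :
    ∀ (esc : Bool) (out : List Char) (p snap dq : Nat), snap < dq →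
    flipM r out false (some (p, snap)) esc dq = (out ++ r, none) := by
  induction r with
  | nil => intro esc out p snap dq h; simp [flipM]
  | cons c r ih =>
    intro esc out p snap dq h
    have h' : snap < (if c = '"' then dq + 1 else dq) := by split_ifs <;> omega
    rw [flipM]
    split_ifs with h1 h2 h3 h4 h5 h6 <;>
      first
        | (exfalso; omega)
        | (exfalso; tauto)
        | (rw [ih _ _ p snap _ (by omega)]; simp)

-- with a pending opener and sqScan finding a closer, flipM rewrites the span exactly as B does
lemma flipM_close (r : List Char) :
    ∀ (esc : Bool) (out0 mid : List Char) (snap : Nat) (j : Nat),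
    sqScan r esc = some j →
    flipM r (out0 ++ '\'' :: mid) false (some (out0.length, snap)) esc snap
      = flipM (r.drop (j + 1)) (out0 ++ '"' :: mid ++ r.take j ++ ['"']) false none false snap := by
  induction r with
  | nil => intro esc out0 mid snap j hs; rw [sqScan] at hs; cases hs
  | cons c r ih =>
    intro esc out0 mid snap j hs
    by_cases hq : c = '"'
    · rw [sqScan] at hs; rw [if_pos hq] at hs; cases hs
    · rw [sqScan] at hs; rw [if_neg hq] at hs
      cases esc with
      | true =>
        rw [if_pos rfl, Option.map_eq_some_iff] at hs
        obtain ⟨j', hj', hjj⟩ := hs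
        subst hjj
        have hsel : flipM (c :: r) (out0 ++ '\'' :: mid) false (some (out0.length, snap)) true snap
            = flipM r (out0 ++ '\'' :: (mid ++ [c])) false (some (out0.length, snap)) false snap := by
          rw [flipM]; rw [if_pos rfl, if_neg hq]
          simp
        rw [hsel, ih false out0 (mid ++ [c]) snap j' hj']
        simp
      | false =>
        rw [if_neg (by simp)] at hs
        by_cases hbs : c = '\\'
        · rw [if_pos hbs, Option.map_eq_some_iff] at hs
          obtain ⟨j', hj', hjj⟩ := hs
          subst hjj
          have hsel : flipM (c :: r) (out0 ++ '\'' :: mid) false (some (out0.length, snap)) false snap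
              = flipM r (out0 ++ '\'' :: (mid ++ [c])) false (some (out0.length, snap)) true snap := by
            rw [flipM]; rw [if_neg (by simp), if_pos hbs, if_neg hq]
            simp
          rw [hsel, ih true out0 (mid ++ [c]) snap j' hj']
          simp
        · rw [if_neg hbs] at hs
          by_cases hsq : c = '\''
          · rw [if_pos hsq] at hs
            have hj0 : j = 0 := by cases hs; rfl
            subst hj0
            have hset : (out0 ++ '\'' :: mid).set out0.length '"' = out0 ++ '"' :: mid := by
              rw [List.set_append, if_neg (by omega)]
              simp
            have hsel : flipM (c :: r) (out0 ++ '\'' :: mid) false (some (out0.length, snap)) false snap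
                = flipM r (out0 ++ '"' :: mid ++ ['"']) false none false snap := by
              rw [flipM]; rw [if_neg (by simp), if_neg hbs,
                if_neg (by rintro ⟨hc, -, -⟩; rw [hc] at hsq; exact absurd hsq (by decide)),
                if_neg (by rintro ⟨-, h⟩; cases h), if_pos ⟨rfl, hsq⟩, if_pos rfl, hset, if_neg hq]
            rw [hsel]
            simp
          · rw [if_neg hsq, Option.map_eq_some_iff] at hs
            obtain ⟨j', hj', hjj⟩ := hs
            subst hjj
            have hsel : flipM (c :: r) (out0 ++ '\'' :: mid) false (some (out0.length, snap)) false snap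
                = flipM r (out0 ++ '\'' :: (mid ++ [c])) false (some (out0.length, snap)) false snap := by
              rw [flipM]; rw [if_neg (by simp), if_neg hbs,
                if_neg (by rintro ⟨-, h, -⟩; cases h),
                if_neg (by rintro ⟨-, h⟩; cases h),
                if_neg (by rintro ⟨-, h⟩; exact hsq h), if_neg hq]
              simp
            rw [hsel, ih false out0 (mid ++ [c]) snap j' hj']
            simp

-- with a pending opener and no closer (blocked by a '"' or unterminated), the rest is verbatim
lemma flipM_noclose (r : List Char) :
    ∀ (esc : Bool) (out0 mid : List Char) (snap : Nat),
    sqScan r esc = none →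
    flipM r (out0 ++ '\'' :: mid) false (some (out0.length, snap)) esc snap
      = (out0 ++ '\'' :: mid ++ r, none) := by
  induction r with
  | nil => intro esc out0 mid snap hs; simp [flipM]
  | cons c r ih =>
    intro esc out0 mid snap hs
    by_cases hq : c = '"'
    · cases esc with
      | true =>
        have hsel : flipM (c :: r) (out0 ++ '\'' :: mid) false (some (out0.length, snap)) true snap
            = flipM r ((out0 ++ '\'' :: mid) ++ [c]) false (some (out0.length, snap)) false (snap + 1) := by
          rw [flipM]; rw [if_pos rfl, if_pos hq]
        rw [hsel, flipM_stuck r false _ out0.length snap (snap + 1) (by omega)]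
        simp
      | false =>
        have hsel : flipM (c :: r) (out0 ++ '\'' :: mid) false (some (out0.length, snap)) false snap
            = flipM r ((out0 ++ '\'' :: mid) ++ [c]) false (some (out0.length, snap)) false (snap + 1) := by
          rw [flipM]; rw [if_neg (by simp), if_neg (by rw [hq]; decide),
            if_neg (by rintro ⟨hc, -, -⟩; rw [hc] at hq; exact absurd hq (by decide)),
            if_neg (by rintro ⟨-, h⟩; cases h),
            if_neg (by rintro ⟨-, hc⟩; rw [hc] at hq; exact absurd hq (by decide)), if_pos hq]
        rw [hsel, flipM_stuck r false _ out0.length snap (snap + 1) (by omega)]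
        simp
    · rw [sqScan] at hs; rw [if_neg hq] at hs
      cases esc with
      | true =>
        rw [if_pos rfl, Option.map_eq_none_iff] at hs
        have hsel : flipM (c :: r) (out0 ++ '\'' :: mid) false (some (out0.length, snap)) true snap
            = flipM r (out0 ++ '\'' :: (mid ++ [c])) false (some (out0.length, snap)) false snap := by
          rw [flipM]; rw [if_pos rfl, if_neg hq]
          simp
        rw [hsel, ih false out0 (mid ++ [c]) snap hs]
        simp
      | false =>
        rw [if_neg (by simp)] at hs
        by_cases hbs : c = '\\'
        · rw [if_pos hbs, Option.map_eq_none_iff] at hs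
          have hsel : flipM (c :: r) (out0 ++ '\'' :: mid) false (some (out0.length, snap)) false snap
              = flipM r (out0 ++ '\'' :: (mid ++ [c])) false (some (out0.length, snap)) true snap := by
            rw [flipM]; rw [if_neg (by simp), if_pos hbs, if_neg hq]
            simp
          rw [hsel, ih true out0 (mid ++ [c]) snap hs]
          simp
        · rw [if_neg hbs] at hs
          by_cases hsq : c = '\''
          · rw [if_pos hsq] at hs; cases hs
          · rw [if_neg hsq, Option.map_eq_none_iff] at hs
            have hsel : flipM (c :: r) (out0 ++ '\'' :: mid) false (some (out0.length, snap)) false snap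
                = flipM r (out0 ++ '\'' :: (mid ++ [c])) false (some (out0.length, snap)) false snap := by
              rw [flipM]; rw [if_neg (by simp), if_neg hbs,
                if_neg (by rintro ⟨-, h, -⟩; cases h),
                if_neg (by rintro ⟨-, h⟩; cases h),
                if_neg (by rintro ⟨-, h⟩; exact hsq h), if_neg hq]
              simp
            rw [hsel, ih false out0 (mid ++ [c]) snap hs]
            simp

-- the intermediate machine equals B's span tokenizer (unconditionally)
lemma flipM_alt (fuel : Nat) :
    ∀ (r : List Char), r.length ≤ fuel →
    ∀ (out : List Char) (dq : Nat),
    flipM r out false none false dq = (out ++ (altGo fuel r).1, (altGo fuel r).2) := by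
  induction fuel with
  | zero =>
    intro r h out dq
    cases r with
    | nil => simp [flipM, altGo]
    | cons c r' => simp at h
  | succ fuel ih =>
    intro r h out dq
    cases r with
    | nil => simp [flipM, altGo]
    | cons c r' =>
      have hlen : r'.length ≤ fuel := by simp at h; omega
      by_cases hbs : c = '\\'
      · have hsel : flipM (c :: r') out false none false dq
            = flipM r' (out ++ [c]) false none true dq := by
          rw [flipM]; rw [if_neg (by simp), if_pos hbs, if_neg (by rw [hbs]; decide)]
        rw [hsel]
        cases r' with
        | nil => simp [flipM, altGo, hbs]
        | cons c2 r'' =>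
          have hsel2 : flipM (c2 :: r'') (out ++ [c]) false none true dq
              = flipM r'' (out ++ [c] ++ [c2]) false none false
                  (if c2 = '"' then dq + 1 else dq) := by
            rw [flipM]; rw [if_pos rfl]
          rw [hsel2, ih r'' (by simp at hlen; omega) (out ++ [c] ++ [c2]) _]
          rw [altGo]
          rw [if_pos hbs]
          simp
      · by_cases hh : c = '#'
        · have hsel : flipM (c :: r') out false none false dq = (out, some (c :: r')) := by
            rw [flipM]; rw [if_neg (by simp), if_neg hbs, if_pos ⟨hh, rfl, rfl⟩]
          rw [hsel, altGo]
          rw [if_neg hbs, if_pos hh]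
          simp
        · by_cases hq : c = '"'
          · have hsel : flipM (c :: r') out false none false dq
                = flipM r' (out ++ [c]) true none false (dq + 1) := by
              rw [flipM]; rw [if_neg (by simp), if_neg hbs, if_neg (fun hx => hh hx.1),
                if_pos ⟨hq, rfl⟩, if_pos hq]
              simp
            rw [hsel, flipM_double r' false (out ++ [c]) (dq + 1),
              ih ((r'.drop (dqScan r' false + 1))) (le_trans (by simp) hlen) _ _]
            rw [altGo]
            rw [if_neg hbs, if_neg hh, if_pos hq]
            simp
          · by_cases hsq : c = '\''
            · have hsel : flipM (c :: r') out false none false dq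
                  = flipM r' (out ++ '\'' :: []) false (some (out.length, dq)) false dq := by
                rw [flipM]; rw [if_neg (by simp), if_neg hbs, if_neg (fun hx => hh hx.1),
                  if_neg (fun hx => hq hx.1), if_pos ⟨rfl, hsq⟩, if_neg hq]
                simp [hsq]
              rw [hsel]
              cases hscan : sqScan r' false with
              | none =>
                rw [flipM_noclose r' false out [] dq hscan, altGo]
                rw [if_neg hbs, if_neg hh, if_neg hq, if_pos hsq, hscan]
                simp [hsq]
              | some j =>
                rw [flipM_close r' false out [] dq j hscan,
                  ih (r'.drop (j + 1)) (le_trans (by simp) hlen) _ _, altGo]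
                rw [if_neg hbs, if_neg hh, if_neg hq, if_pos hsq, hscan]
                simp
            · have hsel : flipM (c :: r') out false none false dq
                  = flipM r' (out ++ [c]) false none false dq := by
                rw [flipM]; rw [if_neg (by simp), if_neg hbs, if_neg (fun hx => hh hx.1),
                  if_neg (fun hx => hq hx.1), if_neg (fun hx => hsq hx.2), if_neg hq]
              rw [hsel, ih r' hlen _ _, altGo]
              rw [if_neg hbs, if_neg hh, if_neg hq, if_neg hsq]
              simp

theorem flip_top (s : String) (hD : ¬ D_flipsingle s) : flipsingle s = flipsingle_alt s := by
  have h6 : (0 : Nat) = 0 → ∀ r, s.toList = '\'' :: r → dscanD r false false = false := by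
    intro _ r hr
    cases hds : dscanD r false false with
    | false => rfl
    | true =>
      exact absurd ⟨by rw [hr]; rfl, by rw [hr]; exact hds⟩ hD
  have h := flip_go_eq s.toList s.toList 0 [] false none false rfl rfl
    (fun j hj => by cases hj) (fun j hj => by cases hj) (fun hj => by cases hj) h6
  simp only [List.nil_append, List.take_zero, List.count_nil, Option.map_none] at h
  have h2 := flipM_alt s.toList.length s.toList (le_refl _) [] 0
  simp only [List.nil_append] at h2
  unfold flipsingle flipsingle_alt
  rw [h, h2]

lemma flip_lenB_ge (rest : List Char) :
    ∀ (out : List Char) (indouble : Bool) (opener : Option (Nat × Nat)) (escaped : Bool) (dq : Nat),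
    out.length ≤ (flipM rest out indouble opener escaped dq).1.length := by
  induction rest with
  | nil => intro out indouble opener escaped dq; simp [flipM]
  | cons c r ih =>
    intro out indouble opener escaped dq
    rcases opener with - | ⟨j, snap⟩
    all_goals
      simp only [flipM]
      split_ifs <;>
        first
          | simp
          | exact le_trans (by simp) (ih _ _ _ _ _)

lemma flip_lemB (rest : List Char) :
    ∀ (out : List Char) (indouble : Bool) (j snap : Nat) (escaped : Bool) (dq : Nat),
    snap ≤ dq →
    dscanD rest escaped (!(dq == snap)) = true →
    out.length + dposD rest escaped (!(dq == snap))
      < (flipM rest out indouble (some (j, snap)) escaped dq).1.length := by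
  induction rest with
  | nil =>
    intro out indouble j snap escaped dq hle hds
    rw [dscanD] at hds
    cases hds
  | cons c r ih =>
    intro out indouble j snap escaped dq hle hds
    have hsaw : ((!(dq == snap)) || (c == '"'))
        = !((if c = '"' then dq + 1 else dq) == snap) := by
      by_cases hc : c = '"' <;> simp [hc] <;> omega
    have hle' : snap ≤ (if c = '"' then dq + 1 else dq) := by
      split_ifs <;> omega
    have hout : (out ++ [c]).length = out.length + 1 := by simp
    cases escaped with
    | true =>
      have hds' : dscanD r false (!((if c = '"' then dq + 1 else dq) == snap)) = true := by
        rw [dscanD] at hds; rwa [if_pos rfl, hsaw] at hds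
      have hdp : dposD (c :: r) true (!(dq == snap))
          = dposD r false (!((if c = '"' then dq + 1 else dq) == snap)) + 1 := by
        rw [dposD]; rw [if_pos rfl, hsaw]
      have hrec := ih (out ++ [c]) indouble j snap false _ hle' hds'
      have hsel : flipM (c :: r) out indouble (some (j, snap)) true dq
          = flipM r (out ++ [c]) indouble (some (j, snap)) false
              (if c = '"' then dq + 1 else dq) := by
        rw [flipM]
        rw [if_pos rfl]
      rw [hsel, hdp]
      rw [hout] at hrec
      omega
    | false =>
      by_cases hbs : c = '\\'
      · have hds' : dscanD r true (!((if c = '"' then dq + 1 else dq) == snap)) = true := by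
          rw [dscanD] at hds; rwa [if_neg (by simp), if_pos hbs, hsaw] at hds
        have hdp : dposD (c :: r) false (!(dq == snap))
            = dposD r true (!((if c = '"' then dq + 1 else dq) == snap)) + 1 := by
          rw [dposD]; rw [if_neg (by simp), if_pos hbs, hsaw]
        have hrec := ih (out ++ [c]) indouble j snap true _ hle' hds'
        have hsel : flipM (c :: r) out indouble (some (j, snap)) false dq
            = flipM r (out ++ [c]) indouble (some (j, snap)) true
                (if c = '"' then dq + 1 else dq) := by
          rw [flipM]
          rw [if_neg (by simp), if_pos hbs]
        rw [hsel, hdp]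
        rw [hout] at hrec
        omega
      · by_cases hh : c = '#'
        · have hdp : dposD (c :: r) false (!(dq == snap)) = 0 := by
            rw [dposD]; rw [if_neg (by simp), if_neg hbs, if_pos hh]
          have hsel : flipM (c :: r) out indouble (some (j, snap)) false dq
              = flipM r (out ++ [c]) indouble (some (j, snap)) false
                  (if c = '"' then dq + 1 else dq) := by
            rw [flipM]
            rw [if_neg (by simp), if_neg hbs,
              if_neg (by rintro ⟨-, h, -⟩; cases h),
              if_neg (by rintro ⟨-, h⟩; cases h),
              if_neg (by rintro ⟨-, h⟩; rw [h] at hh; exact absurd hh (by decide))]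
          have hge := flip_lenB_ge r (out ++ [c]) indouble (some (j, snap)) false
            (if c = '"' then dq + 1 else dq)
          rw [hsel, hdp]
          rw [hout] at hge
          omega
        · have hnq : ¬(c = '\'' ∧ (!(dq == snap)) = false) := by
            intro hq
            rw [dscanD] at hds
            rw [if_neg (by simp), if_neg hbs, if_neg hh, if_pos hq] at hds
            cases hds
          have hds' : dscanD r false (!((if c = '"' then dq + 1 else dq) == snap)) = true := by
            rw [dscanD] at hds
            rwa [if_neg (by simp), if_neg hbs, if_neg hh, if_neg hnq, hsaw] at hds
          have hdp : dposD (c :: r) false (!(dq == snap))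
              = dposD r false (!((if c = '"' then dq + 1 else dq) == snap)) + 1 := by
            rw [dposD]; rw [if_neg (by simp), if_neg hbs, if_neg hh, if_neg hnq, hsaw]
          have hrec := ih (out ++ [c]) indouble j snap false _ hle' hds'
          have hfin : flipM (c :: r) out indouble (some (j, snap)) false dq
                = flipM r (out ++ [c]) indouble (some (j, snap)) false
                    (if c = '"' then dq + 1 else dq) →
              out.length + dposD (c :: r) false (!(dq == snap))
                < (flipM (c :: r) out indouble (some (j, snap)) false dq).1.length := by
            intro hsel
            rw [hsel, hdp]
            rw [hout] at hrec
            omega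
          by_cases hsq : c = '\''
          · have hdqs : ¬ dq = snap := by
              intro h
              exact hnq ⟨hsq, by simp [h]⟩
            cases indouble with
            | true =>
              refine hfin ?_
              rw [flipM]
              rw [if_neg (by simp), if_neg hbs,
                if_neg (by rintro ⟨-, h, -⟩; cases h),
                if_neg (by rintro ⟨-, h⟩; cases h),
                if_neg (by rintro ⟨h, -⟩; cases h)]
            | false =>
              refine hfin ?_
              rw [flipM]
              rw [if_neg (by simp), if_neg hbs,
                if_neg (by rintro ⟨-, h, -⟩; cases h),
                if_neg (by rintro ⟨-, h⟩; cases h),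
                if_pos ⟨rfl, hsq⟩]
              rw [if_neg hdqs]
          · refine hfin ?_
            rw [flipM]
            rw [if_neg (by simp), if_neg hbs,
              if_neg (by rintro ⟨-, h, -⟩; cases h),
              if_neg (by rintro ⟨-, h⟩; cases h),
              if_neg (by rintro ⟨-, h⟩; exact hsq h)]

lemma flip_lemA (s : List Char) (rest : List Char) :
    ∀ (i : Nat) (out : List Char) (escaped : Bool),
    s.drop i = rest →
    out.length = i →
    dscanD rest escaped (!((s.take i).count '"' == 0)) = true →
    (flipsingleGo s (out ++ rest) false (some 0) escaped i rest.length).1.length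
      = i + dposD rest escaped (!((s.take i).count '"' == 0)) := by
  induction rest with
  | nil =>
    intro i out escaped h1 h2 hds
    rw [dscanD] at hds
    cases hds
  | cons c rest' ih =>
    intro i out escaped h1 h2 hds
    have hlen : i < s.length := by
      have := congrArg List.length h1
      simp at this; omega
    have hgm : s[i]? = some c := by
      have h0 : (s.drop i)[0]? = some c := by rw [h1]; rfl
      simpa using h0
    have htake : s.take (i + 1) = s.take i ++ [c] := by
      rw [List.take_add_one, hgm]; rfl
    have hsaw : ((!((s.take i).count '"' == 0)) || (c == '"'))
        = !((s.take (i + 1)).count '"' == 0) := by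
      rw [htake, List.count_append]
      by_cases hc : c = '"' <;> simp [hc]
    have hdropS : s.drop (i + 1) = rest' := by
      have := congrArg List.tail h1
      simpa [List.tail_drop] using this
    have heD : (out ++ c :: rest').getD i ' ' = c := by
      rw [← h2, List.getD_eq_getElem?_getD, List.getElem?_append_right (le_refl _)]; simp
    have hsD : s.getD i ' ' = c := by
      rw [List.getD_eq_getElem?_getD, hgm]; rfl
    have hsplit : out ++ c :: rest' = (out ++ [c]) ++ rest' := by simp
    have h2' : (out ++ [c]).length = i + 1 := by simp [h2]
    rw [List.length_cons]
    cases escaped with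
    | true =>
      have hds' : dscanD rest' false (!((s.take (i + 1)).count '"' == 0)) = true := by
        rw [dscanD] at hds; rwa [if_pos rfl, hsaw] at hds
      have hdp : dposD (c :: rest') true (!((s.take i).count '"' == 0))
          = dposD rest' false (!((s.take (i + 1)).count '"' == 0)) + 1 := by
        rw [dposD]; rw [if_pos rfl, hsaw]
      have hrec := ih (i + 1) (out ++ [c]) false hdropS h2' hds'
      have hsel : flipsingleGo s (out ++ c :: rest') false (some 0) true i (rest'.length + 1)
          = flipsingleGo s ((out ++ [c]) ++ rest') false (some 0) false (i + 1) rest'.length := by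
        rw [← hsplit, flipsingleGo]
        rw [if_pos rfl]
      rw [hsel, hrec, hdp]
      omega
    | false =>
      by_cases hbs : c = '\\'
      · have hds' : dscanD rest' true (!((s.take (i + 1)).count '"' == 0)) = true := by
          rw [dscanD] at hds; rwa [if_neg (by simp), if_pos hbs, hsaw] at hds
        have hdp : dposD (c :: rest') false (!((s.take i).count '"' == 0))
            = dposD rest' true (!((s.take (i + 1)).count '"' == 0)) + 1 := by
          rw [dposD]; rw [if_neg (by simp), if_pos hbs, hsaw]
        have hrec := ih (i + 1) (out ++ [c]) true hdropS h2' hds'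
        have hsel : flipsingleGo s (out ++ c :: rest') false (some 0) false i (rest'.length + 1)
            = flipsingleGo s ((out ++ [c]) ++ rest') false (some 0) true (i + 1) rest'.length := by
          rw [← hsplit, flipsingleGo, heD]
          rw [if_neg (by simp), if_pos hbs]
        rw [hsel, hrec, hdp]
        omega
      · by_cases hh : c = '#'
        · have hdp : dposD (c :: rest') false (!((s.take i).count '"' == 0)) = 0 := by
            rw [dposD]; rw [if_neg (by simp), if_neg hbs, if_pos hh]
          have hsel : flipsingleGo s (out ++ c :: rest') false (some 0) false i (rest'.length + 1)
              = ((out ++ c :: rest').take i, some (s.drop i)) := by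
            rw [flipsingleGo, heD]
            rw [if_neg (by simp), if_neg hbs, if_pos ⟨hh, Or.inr rfl, rfl⟩]
          rw [hsel, hdp, List.length_take]
          have hlen2 : (out ++ c :: rest').length = i + rest'.length + 1 := by
            rw [List.length_append, List.length_cons, h2]; omega
          omega
        · have hct0 : ¬(c = '\'' ∧ (!((s.take i).count '"' == 0)) = false) := by
            intro hq
            rw [dscanD] at hds
            rw [if_neg (by simp), if_neg hbs, if_neg hh, if_pos hq] at hds
            cases hds
          have hds' : dscanD rest' false (!((s.take (i + 1)).count '"' == 0)) = true := by
            rw [dscanD] at hds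
            rwa [if_neg (by simp), if_neg hbs, if_neg hh, if_neg hct0, hsaw] at hds
          have hdp : dposD (c :: rest') false (!((s.take i).count '"' == 0))
              = dposD rest' false (!((s.take (i + 1)).count '"' == 0)) + 1 := by
            rw [dposD]; rw [if_neg (by simp), if_neg hbs, if_neg hh, if_neg hct0, hsaw]
          have hrec := ih (i + 1) (out ++ [c]) false hdropS h2' hds'
          have hsel : flipsingleGo s (out ++ c :: rest') false (some 0) false i (rest'.length + 1)
              = flipsingleGo s ((out ++ [c]) ++ rest') false (some 0) false (i + 1) rest'.length := by
            rw [← hsplit, flipsingleGo, heD, hsD]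
            rw [if_neg (by simp), if_neg hbs,
              if_neg (show ¬(c = '#' ∧ ((some 0 : Option Nat) = none ∨ (some 0 : Option Nat) = some 0) ∧ (false : Bool) = false) from fun h => hh h.1),
              if_neg (show ¬(c = '"' ∧ (some 0 : Option Nat) = none) from fun h => by cases h.2),
              if_neg (show ¬((false : Bool) = true) from by simp)]
            by_cases hsq : c = '\''
            · rw [if_neg (show ¬(¬c = '\'') from fun h => h hsq),
                if_neg (show ¬((false : Bool) = false ∧ (some 0 : Option Nat) = none) from fun h => by cases h.2)]
              have hcnt0 : (s.take i).count '"' ≠ 0 := fun h0 => hct0 ⟨hsq, by simp [h0]⟩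
              rw [if_neg (show ¬((PySem.List.slice s (some ((0 : Nat) : Int)) (some (i : Int))).count '"' = 0) from by
                rw [PySem.List.slice_natCast]; simpa using hcnt0)]
            · rw [if_pos hsq]
          rw [hsel, hrec, hdp]
          omega

-- ===== VERDICT (by name: the statement is the Claim_ definition above) =====
theorem flipsingle_spec : Claim_unchanged_flipsingle := by
  intro s _ hD
  exact flip_top s hD

theorem flipsingle_changed : Claim_changed_flipsingle := by
  unfold Claim_changed_flipsingle; decide

theorem flipsingle_tight : Claim_exact_flipsingle := by
  unfold Claim_exact_flipsingle
  intro s _ hD heq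
  obtain ⟨hhd, hds⟩ := hD
  cases hl : s.toList with
  | nil => rw [hl] at hhd; cases hhd
  | cons c r =>
    rw [hl] at hhd hds
    have hc : c = '\'' := by simpa using hhd
    subst hc
    have hdsr : dscanD r false false = true := by simpa using hds
    have hA1 : flipsingleGo ('\'' :: r) ('\'' :: r) false none false 0 (r.length + 1)
        = flipsingleGo ('\'' :: r) ('\'' :: r) false (some 0) false 1 r.length := by
      rw [flipsingleGo]
      rw [if_neg (by simp), if_neg (by simp), if_neg (by rintro ⟨h, -, -⟩; simp at h),
        if_neg (by rintro ⟨h, -⟩; simp at h), if_neg (by simp),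
        if_neg (by simp), if_pos ⟨rfl, rfl⟩]
    have hsaw0 : (!(((('\'' :: r).take 1).count '"') == 0)) = false := rfl
    have hA2 := flip_lemA ('\'' :: r) r 1 ['\''] false rfl rfl (by rw [hsaw0]; exact hdsr)
    rw [hsaw0] at hA2
    have hB0 := flipM_alt (r.length + 1) ('\'' :: r) (by simp) [] 0
    simp only [List.nil_append] at hB0
    have hB1 : flipM ('\'' :: r) [] false none false 0
        = flipM r ['\''] false (some (0, 0)) false 0 := by
      rw [flipM]
      rw [if_neg (by simp), if_neg (by simp), if_neg (by rintro ⟨h, -, -⟩; simp at h),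
        if_neg (by rintro ⟨h, -⟩; simp at h), if_pos ⟨rfl, rfl⟩]
      simp
    have hB2 := flip_lemB r ['\''] false 0 0 false 0 (le_refl 0) hdsr
    have hq := congrArg (fun p => p.1.toList.length) heq
    simp only [flipsingle, flipsingle_alt, String.toList_ofList] at hq
    rw [hl] at hq
    rw [show ('\'' :: r).length = r.length + 1 from rfl, hA1] at hq
    have hqB : (altGo (r.length + 1) ('\'' :: r)).1 = (flipM r ['\''] false (some (0, 0)) false 0).1 := by
      rw [← hB1, hB0]
    rw [hqB] at hq
    have hA2' : (flipsingleGo ('\'' :: r) ('\'' :: r) false (some 0) false 1 r.length).1.length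
        = 1 + dposD r false false := hA2
    have hB2' : 1 + dposD r false false
        < (flipM r ['\''] false (some (0, 0)) false 0).1.length := hB2
    omega
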